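-- pv_equiv track=rewrite | github.com/InfFMS/pythonless5-markkres | task8.py | odin
-- ===== SOURCE A (Python) =====
-- def odin(num):
--     string=str(num)
--     a=0
--     for i in range(1,len(string)):
--         if string[i]!=string[i-1]:
--             a=1
--             break
--     if a==1: return False
--     else: return True
-- ===== SOURCE B (Python) =====
-- def odin(num):
--     return len(set(str(num))) <= 1
-- ===== Notes on version B (the rewrite author's own statement) =====
-- stated objective: simpler
-- what changed: Replaces the adjacent-pair loop with flag and break by a single construct-and-test: build the set of characters of str(num) and check it has at most one distinct element.
import Mathlib
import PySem

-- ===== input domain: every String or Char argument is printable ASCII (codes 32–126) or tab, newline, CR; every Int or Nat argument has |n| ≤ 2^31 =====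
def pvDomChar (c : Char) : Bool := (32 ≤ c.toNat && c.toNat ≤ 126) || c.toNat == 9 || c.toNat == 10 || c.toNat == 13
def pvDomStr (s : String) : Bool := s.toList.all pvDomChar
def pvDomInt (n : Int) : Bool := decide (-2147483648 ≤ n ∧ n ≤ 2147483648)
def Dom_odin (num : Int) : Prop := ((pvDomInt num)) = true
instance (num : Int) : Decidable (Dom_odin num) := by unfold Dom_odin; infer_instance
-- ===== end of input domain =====

-- B replaces A's adjacent-pair loop with flag/break by a single set-of-characters cardinality test (objective: simpler).

-- ===== PORT A =====
-- A's for-loop over range(1, len(string)) with early break on mismatch: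
-- walk the tail comparing each char to its predecessor; 1 = flag set, 0 = not
def odinLoop : Char → List Char → Nat
  | _, [] => 0
  | prev, c :: t => if c ≠ prev then 1 else odinLoop c t

def odin (num : Int) : Bool :=
  let string := PySem.Int.toChars num
  let a : Nat :=
    match string with
    | [] => 0
    | c :: t => odinLoop c t
  if a = 1 then false else true

-- ===== PORT B =====
-- Source B: return len(set(str(num))) <= 1
def odin_alt (num : Int) : Bool :=
  decide (PySem.Set.len (PySem.Set.ofList (PySem.Int.toChars num)) ≤ 1)

-- ===== PRECONDITION & SPEC =====
def Spec_odin (num : Int) (out : Bool) : Prop := out = odin_alt num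
instance (num : Int) (out : Bool) : Decidable (Spec_odin num out) := by unfold Spec_odin; infer_instance

-- ===== CLAIM (what is proved, stated in full; the proofs are below) =====
def Claim_equal_odin : Prop := ∀ (num : Int), Dom_odin num → Spec_odin num (odin num)

-- ===== LEMMAS AND PROOFS =====

-- A's flag stays 0 exactly when every tail character equals its predecessor, i.e. equals the head
lemma odinLoop_ne_one_iff (t : List Char) (c : Char) :
    odinLoop c t ≠ 1 ↔ ∀ x ∈ t, x = c := by
  induction t generalizing c with
  | nil => simp [odinLoop]
  | cons d t ih =>
    by_cases h : d = c
    · subst h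
      simpa [odinLoop] using ih d
    · have h1 : odinLoop c (d :: t) = 1 := by simp [odinLoop, h]
      rw [h1]
      constructor
      · intro hne; exact absurd rfl hne
      · intro hall; exact absurd (hall d (List.mem_cons_self ..)) h

-- B's set-cardinality test holds exactly when every tail character equals the head
lemma ofList_len_le_one_iff (c : Char) (t : List Char) :
    (PySem.Set.ofList (c :: t)).length ≤ 1 ↔ ∀ x ∈ t, x = c := by
  constructor
  · intro h x hx
    have hc : c ∈ PySem.Set.ofList (c :: t) := by
      rw [PySem.Set.mem_ofList]; exact List.mem_cons_self ..
    have hxm : x ∈ PySem.Set.ofList (c :: t) := by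
      rw [PySem.Set.mem_ofList]; exact List.mem_cons_of_mem _ hx
    match PySem.Set.ofList (c :: t), h, hc, hxm with
    | [], _, hc, _ => simp at hc
    | [a], _, hc, hxm =>
      simp at hc hxm; rw [hc, hxm]
  · intro h
    have hsub : PySem.Set.ofList (c :: t) ⊆ [c] := by
      intro x hx
      rw [PySem.Set.mem_ofList] at hx
      rcases List.mem_cons.mp hx with h1 | h1
      · simp [h1]
      · simp [h x h1]
    exact (List.Nodup.subperm (PySem.Set.nodup_ofList _) hsub).length_le

-- ===== VERDICT (by name: the statement is the Claim_ definition above) =====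
theorem odin_spec : Claim_equal_odin := by
  intro num _
  unfold Spec_odin odin odin_alt
  cases h : PySem.Int.toChars num with
  | nil => simp [PySem.Set.len, PySem.Set.ofList]
  | cons c t =>
    by_cases ha : odinLoop c t = 1
    · have hne : ¬ ∀ x ∈ t, x = c := fun hall => ((odinLoop_ne_one_iff t c).mpr hall) ha
      have hlen : ¬ (PySem.Set.ofList (c :: t)).length ≤ 1 :=
        fun hle => hne ((ofList_len_le_one_iff c t).mp hle)
      simp [PySem.Set.len, ha, hlen]
    · have hall := (odinLoop_ne_one_iff t c).mp ha
      have hlen : (PySem.Set.ofList (c :: t)).length ≤ 1 := (ofList_len_le_one_iff c t).mpr hall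
      simp [PySem.Set.len, ha, hlen]
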